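-- pv_equiv track=rewrite | github.com/jocarvajal/Metodo-Simplex-IO | Proyecto1/venv/include/metodo_dual.py | armar_dual
-- ===== SOURCE A (Python) =====
-- def transponer(matriz_primal):
--     transpuesta = [[matriz_primal[j][i] for j in range(len(matriz_primal))] for i in range(len(matriz_primal[0]))]
--     return transpuesta
--
-- def armar_dual(primal):
--     matriz = transponer(primal)
--     matriz_dual = [fila[:] for fila in matriz]
--     funcion_objetivo = matriz[-1]
--     for fila in range(len(matriz) - 1):
--         matriz_dual[fila + 1] = matriz[fila]
--     matriz_dual[0] = funcion_objetivo
--     return matriz_dual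
-- ===== SOURCE B (Python) =====
-- def armar_dual(primal):
--     cols = len(primal[0])
--     dual = [[fila[cols - 1] for fila in primal]]
--     for i in range(cols - 1):
--         dual.append([fila[i] for fila in primal])
--     return dual
-- ===== Notes on version B (the rewrite author's own statement) =====
-- stated objective: simpler
-- what changed: B builds the dual directly, emitting the last primal column first and then the remaining columns in order, with no intermediate transpose, no row copies and no in-place rotation loop.
import Mathlib
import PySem

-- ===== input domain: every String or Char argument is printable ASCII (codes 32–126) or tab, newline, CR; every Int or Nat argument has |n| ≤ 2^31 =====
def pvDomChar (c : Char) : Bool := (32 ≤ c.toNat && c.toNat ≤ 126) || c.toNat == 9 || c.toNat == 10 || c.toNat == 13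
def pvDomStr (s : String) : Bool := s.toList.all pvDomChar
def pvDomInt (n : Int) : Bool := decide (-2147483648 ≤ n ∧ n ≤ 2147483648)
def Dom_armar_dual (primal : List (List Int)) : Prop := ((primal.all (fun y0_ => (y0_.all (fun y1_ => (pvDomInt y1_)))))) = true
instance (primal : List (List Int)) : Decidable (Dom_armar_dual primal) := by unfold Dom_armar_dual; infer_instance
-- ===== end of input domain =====

-- B builds the dual directly (last primal column first, then the remaining columns) in one pass,
-- with no intermediate transpose, no row copies and no in-place rotation loop; objective: simpler.

-- ===== PORT A =====
def transponer (matriz_primal : List (List Int)) : List (List Int) :=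
  (List.range (PySem.List.pyGetD matriz_primal 0 []).length).map (fun (i : Nat) =>
    (List.range matriz_primal.length).map (fun (j : Nat) =>
      PySem.List.pyGetD (PySem.List.pyGetD matriz_primal (j : Int) []) (i : Int) 0))

def armar_dual (primal : List (List Int)) : List (List Int) :=
  ((List.range ((transponer primal).length - 1)).foldl
      (fun d (fila : Nat) => d.set (fila + 1) (PySem.List.pyGetD (transponer primal) (fila : Int) []))
      ((transponer primal).map (fun fila => PySem.List.slice fila none none))).set 0
    (PySem.List.pyGetD (transponer primal) (-1) [])

-- ===== PORT B =====
def armar_dual_alt (primal : List (List Int)) : List (List Int) :=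
  (List.range ((PySem.List.pyGetD primal 0 []).length - 1)).foldl
    (fun d (i : Nat) => d ++ [primal.map (fun fila => PySem.List.pyGetD fila (i : Int) 0)])
    [primal.map (fun fila =>
      PySem.List.pyGetD fila (((PySem.List.pyGetD primal 0 []).length : Int) - 1) 0)]

-- ===== PRECONDITION & SPEC =====
-- Pre_ excludes exactly the inputs on which the Python A raises IndexError: an empty matrix,
-- a matrix whose first row is empty, and a matrix with some row shorter than the first row.
def Pre_armar_dual (primal : List (List Int)) : Prop :=
  primal ≠ [] ∧ 0 < (primal.headD []).length ∧
    ∀ fila ∈ primal, (primal.headD []).length ≤ fila.length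
instance (primal : List (List Int)) : Decidable (Pre_armar_dual primal) := by
  unfold Pre_armar_dual; infer_instance

def pvWitness_armar_dual : List (List Int) := [[1, 2], [3, 4]]

def Spec_armar_dual (primal : List (List Int)) (out : List (List Int)) : Prop := out = armar_dual_alt primal
instance (primal : List (List Int)) (out : List (List Int)) : Decidable (Spec_armar_dual primal out) := by unfold Spec_armar_dual; infer_instance

-- ===== CLAIM (what is proved, stated in full; the proofs are below) =====
def Claim_equal_armar_dual : Prop := ∀ (primal : List (List Int)), Dom_armar_dual primal → Pre_armar_dual primal → Spec_armar_dual primal (armar_dual primal)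

-- ===== LEMMAS AND PROOFS =====

-- column i of the primal, as both ports read it
def pvCol (primal : List (List Int)) (i : Nat) : List Int :=
  primal.map (fun fila => PySem.List.pyGetD fila (i : Int) 0)

theorem map_range_getD {α β : Type} (l : List α) (g : α → β) (d : α) :
    (List.range l.length).map (fun j => g (l.getD j d)) = l.map g := by
  induction l with
  | nil => simp
  | cons a t ih =>
    simp only [List.length_cons, List.range_succ_eq_map, List.map_cons, List.map_map]
    refine congrArg₂ _ rfl ?_
    simpa using ih

theorem transponer_eq (primal : List (List Int)) :
    transponer primal =
      (List.range (PySem.List.pyGetD primal 0 []).length).map (pvCol primal) := by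
  unfold transponer pvCol
  refine List.map_congr_left (fun i _ => ?_)
  simpa [PySem.List.pyGetD_natCast] using
    map_range_getD primal (fun fila => PySem.List.pyGetD fila (i : Int) 0) []

theorem foldl_append_singleton {α : Type} (g : Nat → α) (n : Nat) (init : List α) :
    (List.range n).foldl (fun d i => d ++ [g i]) init = init ++ (List.range n).map g := by
  induction n with
  | zero => simp
  | succ m ih => rw [List.range_succ, List.foldl_append]; simp [ih]

theorem foldl_set_length {α : Type} (f : Nat → α) (n : Nat) (d : List α) :
    ((List.range n).foldl (fun acc fila => acc.set (fila + 1) (f fila)) d).length = d.length := by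
  induction n with
  | zero => simp
  | succ m ih => rw [List.range_succ, List.foldl_append]; simp [ih]

theorem foldl_set_getElem? {α : Type} (f : Nat → α) (n : Nat) (d : List α) (j : Nat) :
    ((List.range n).foldl (fun acc fila => acc.set (fila + 1) (f fila)) d)[j]? =
      if 1 ≤ j ∧ j ≤ n ∧ j < d.length then some (f (j - 1)) else d[j]? := by
  induction n with
  | zero =>
    simp only [List.range_zero, List.foldl_nil]
    rw [if_neg (by omega)]
  | succ m ih =>
    rw [List.range_succ, List.foldl_append]
    simp only [List.foldl_cons, List.foldl_nil, List.getElem?_set]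
    rw [foldl_set_length, ih]
    by_cases hj : m + 1 = j
    · subst hj
      by_cases hl : m + 1 < d.length
      · rw [if_pos rfl, if_pos hl, if_pos ⟨by omega, by omega, hl⟩]
        simp
      · rw [if_pos rfl, if_neg hl, if_neg (by omega),
          List.getElem?_eq_none (by omega : d.length ≤ m + 1)]
    · rw [if_neg hj]
      have hiff : (1 ≤ j ∧ j ≤ m ∧ j < d.length) ↔ (1 ≤ j ∧ j ≤ m + 1 ∧ j < d.length) := by
        omega
      simp only [hiff]

theorem armar_dual_spec' (primal : List (List Int)) (hpre : Pre_armar_dual primal) :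
    armar_dual primal = armar_dual_alt primal := by
  obtain ⟨hne, hc, -⟩ := hpre
  set c := (PySem.List.pyGetD primal 0 []).length with hcdef
  have hcpos : 0 < c := by
    have h0 : PySem.List.pyGetD primal 0 [] = primal.headD [] := by
      cases primal with
      | nil => simp at hne
      | cons a t => simp [PySem.List.pyGetD_zero]
    rw [hcdef, h0]; exact hc
  have hT : transponer primal = (List.range c).map (pvCol primal) := transponer_eq primal
  -- B's value in closed form
  have hcast : ((c : Int) - 1) = ((c - 1 : Nat) : Int) := by omega
  have hB : armar_dual_alt primal =
      pvCol primal (c - 1) :: (List.range (c - 1)).map (pvCol primal) := by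
    unfold armar_dual_alt
    rw [foldl_append_singleton
      (fun i => primal.map (fun fila => PySem.List.pyGetD fila (i : Int) 0))]
    rw [← hcdef, hcast]  -- cast cols-1 to a Nat index
    rfl
  rw [hB]
  unfold armar_dual
  rw [hT]
  have hlen : ((List.range c).map (pvCol primal)).length = c := by simp
  have hfo : PySem.List.pyGetD ((List.range c).map (pvCol primal)) (-1) [] =
      pvCol primal (c - 1) := by
    have hne' : (List.range c).map (pvCol primal) ≠ [] := by
      simp only [ne_eq, List.map_eq_nil_iff, List.range_eq_nil]
      omega
    rw [PySem.List.pyGetD_neg_one _ _ hne', List.getLast_eq_getElem]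
    simp [hlen]
  rw [hfo, hlen]
  have hmapid : ((List.range c).map (pvCol primal)).map
      (fun fila => PySem.List.slice fila none none) = (List.range c).map (pvCol primal) := by
    simp [PySem.List.slice_none_none]
  rw [hmapid]
  apply List.ext_getElem?
  intro j
  rw [List.getElem?_set]
  by_cases hj0 : j = 0
  · subst hj0
    rw [if_pos rfl, foldl_set_length, if_pos (by omega : 0 < ((List.range c).map (pvCol primal)).length)]
    simp
  · rw [if_neg (by omega : ¬ (0 = j))]
    rw [foldl_set_getElem?
      (fun fila => PySem.List.pyGetD ((List.range c).map (pvCol primal)) (fila : Int) [])]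
    rw [hlen]
    by_cases hjc : j < c
    · rw [if_pos ⟨by omega, by omega, hjc⟩]
      rw [List.getElem?_cons, if_neg hj0, List.getElem?_map,
        List.getElem?_range (by omega : j - 1 < c - 1)]
      simp only [Option.map_some, Option.some.injEq]
      rw [PySem.List.pyGetD_natCast, List.getD_eq_getElem?_getD, List.getElem?_map,
        List.getElem?_range (by omega : j - 1 < c)]
      rfl
    · rw [if_neg (by omega)]
      rw [List.getElem?_eq_none (by simpa [hlen] using (by omega : c ≤ j)),
        List.getElem?_eq_none]
      simp only [List.length_cons, List.length_map, List.length_range]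
      omega

-- ===== VERDICT (by name: the statement is the Claim_ definition above) =====
theorem armar_dual_spec : Claim_equal_armar_dual := by
  intro primal _ hpre
  exact armar_dual_spec' primal hpre
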